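-- pv_equiv track=rewrite | github.com/lhy3944/aise-v2-backend | backend/src/services/record_svc.py | _build_display_counters
-- ===== SOURCE A (Python) =====
-- def _build_display_counters(display_ids: list[str]) -> dict[str, int]:
--     # display_id의 prefix를 직접 파싱한다 — DISPLAY_ID_PREFIX_MAP에 없는
--     # 커스텀 섹션 타입(예: 'security' → 'SEC')도 카운터에 포함되어야 한다.
--     counters: dict[str, int] = {}
--     for display_id in display_ids:
--         prefix, sep, tail = display_id.rpartition("-")
--         if not sep or not prefix:
--             continue
--         try:
--             seq = int(tail)
--         except ValueError:
--             continue
--         counters[prefix] = max(counters.get(prefix, 0), seq)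
--     return counters
-- ===== SOURCE B (Python) =====
-- def _parse(display_id):
--     # same rpartition / non-empty-prefix / int(tail) filtering as the original
--     head, sep, tail = display_id.rpartition("-")
--     if not sep or not head:
--         return None
--     try:
--         return head, int(tail)
--     except ValueError:
--         return None
--
--
-- def _build_display_counters(display_ids: list[str]) -> dict[str, int]:
--     # Staged: filter/parse once, list prefixes in first-occurrence order,
--     # then compute each prefix's max (floored at 0) by a scan over the pairs.
--     pairs = [p for p in map(_parse, display_ids) if p is not None]
--     prefixes = list(dict.fromkeys(head for head, _ in pairs))
--     return {p: max([0] + [q for r, q in pairs if r == p]) for p in prefixes}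
-- ===== Notes on version B (the rewrite author's own statement) =====
-- stated objective: alternative
-- what changed: Replaces A's single-pass dict of running maxima by a staged pipeline: parse/filter once into a (prefix, seq) pair list, list the prefixes in first-occurrence order via dict.fromkeys, then compute each prefix's max([0, *seqs]) by a scan of the pair list.
import Mathlib
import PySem

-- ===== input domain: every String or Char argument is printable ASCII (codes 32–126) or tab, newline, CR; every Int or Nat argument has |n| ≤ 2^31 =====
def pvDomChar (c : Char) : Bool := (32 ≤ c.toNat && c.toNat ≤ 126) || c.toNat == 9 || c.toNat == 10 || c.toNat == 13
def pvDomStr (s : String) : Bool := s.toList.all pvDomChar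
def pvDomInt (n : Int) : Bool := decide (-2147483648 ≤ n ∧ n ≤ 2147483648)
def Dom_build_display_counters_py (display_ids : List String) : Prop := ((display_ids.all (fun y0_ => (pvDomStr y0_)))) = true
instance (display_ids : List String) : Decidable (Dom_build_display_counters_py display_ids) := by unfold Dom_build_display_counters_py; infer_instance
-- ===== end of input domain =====

-- B replaces A's one-pass running-max dict by a staged pipeline: parse/filter once into a pair
-- list, list the prefixes in first-occurrence order (dict.fromkeys), then compute each prefix's
-- max (floored at 0) by a scan over the pairs; same return value, objective: alternative.

-- ===== PORT A =====
-- s.rpartition("-") for the single-character separator "-": exact (last occurrence splits the string;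
-- no occurrence gives empty head and separator).
def rpartitionDash (s : List Char) : List Char × List Char × List Char :=
  let i := PySem.Chars.rfind s ['-']
  if i = -1 then ([], [], s)
  else (s.take i.toNat, ['-'], s.drop (i.toNat + 1))

-- the shared filtering lines of both Pythons: rpartition, the two `continue` guards, int(tail)
-- (in B this is the helper `_parse`)
def parseEntry (s : String) : Option (String × Int) :=
  let r := rpartitionDash s.toList
  if r.2.1 = [] ∨ r.1 = [] then none
  else
    match PySem.Int.ofChars? r.2.2 with
    | none => none
    | some q => some (String.ofList r.1, q)

def build_display_counters_py (display_ids : List String) : List (String × Int) :=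
  (display_ids.foldl (fun d s =>
      match parseEntry s with
      | none => d
      | some pq => d.insert pq.1 (max (d.getD pq.1 0) pq.2)) PySem.Dict.empty).items

-- ===== PORT B =====
def build_display_counters_py_alt (display_ids : List String) : List (String × Int) :=
  let pairs := display_ids.filterMap parseEntry
  let prefixes := PySem.List.dedup (pairs.map Prod.fst)
  prefixes.map (fun p =>
    (p, ((pairs.filter (fun rq => rq.1 == p)).map Prod.snd).foldl max 0))

-- ===== PRECONDITION & SPEC =====
def Spec_build_display_counters_py (display_ids : List String) (out : List (String × Int)) : Prop := out = build_display_counters_py_alt display_ids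
instance (display_ids : List String) (out : List (String × Int)) : Decidable (Spec_build_display_counters_py display_ids out) := by unfold Spec_build_display_counters_py; infer_instance

-- ===== CLAIM (what is proved, stated in full; the proofs are below) =====
def Claim_equal_build_display_counters_py : Prop := ∀ (display_ids : List String), Dom_build_display_counters_py display_ids → Spec_build_display_counters_py display_ids (build_display_counters_py display_ids)

-- ===== LEMMAS AND PROOFS =====

-- A's per-iteration step, as a function of the parsed pair
def stepA (d : PySem.Dict String Int) (pq : String × Int) : PySem.Dict String Int :=
  d.insert pq.1 (max (d.getD pq.1 0) pq.2)

-- B's per-prefix value: max of the parsed seqs of that prefix, floored at 0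
def valAt (pairs : List (String × Int)) (p : String) : Int :=
  ((pairs.filter (fun rq => rq.1 == p)).map Prod.snd).foldl max 0

-- the table B produces from a pair list
def tableOf (pairs : List (String × Int)) : List (String × Int) :=
  (PySem.Set.ofList (pairs.map Prod.fst)).map (fun p => (p, valAt pairs p))

lemma find?_beq (l : List String) (p : String) :
    l.find? (fun r => r == p) = if p ∈ l then some p else none := by
  induction l with
  | nil => simp
  | cons x t ih =>
    by_cases h : x = p
    · simp [h]
    · simp [h, ih, Ne.symm h]

lemma valAt_not_mem (pairs : List (String × Int)) (p : String)
    (h : p ∉ pairs.map Prod.fst) : valAt pairs p = 0 := by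
  have : pairs.filter (fun rq => rq.1 == p) = [] := by
    rw [List.filter_eq_nil_iff]
    intro rq hrq hbeq
    exact h (List.mem_map.2 ⟨rq, hrq, beq_iff_eq.1 hbeq⟩)
  simp [valAt, this]

lemma getD_table (pairs : List (String × Int)) (p : String) :
    (PySem.Dict.mk (tableOf pairs)).getD p 0 = valAt pairs p := by
  simp only [PySem.Dict.getD, PySem.Dict.get?, tableOf, List.find?_map]
  have hc : ((fun x : String × Int => x.1 == p) ∘ (fun r : String => (r, valAt pairs r)))
      = fun r : String => r == p := rfl
  rw [hc, find?_beq]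
  by_cases h : p ∈ pairs.map Prod.fst
  · simp [PySem.Set.mem_ofList, h]
  · simp [PySem.Set.mem_ofList, h, valAt_not_mem pairs p h]

lemma contains_table (pairs : List (String × Int)) (p : String) :
    (PySem.Dict.mk (tableOf pairs)).contains p = decide (p ∈ pairs.map Prod.fst) := by
  simp [PySem.Dict.contains, tableOf, List.any_map, Function.comp_def,
    List.any_beq', PySem.Set.mem_ofList]

lemma valAt_append_singleton (pairs : List (String × Int)) (pq : String × Int) (r : String) :
    valAt (pairs ++ [pq]) r = if r = pq.1 then max (valAt pairs r) pq.2 else valAt pairs r := by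
  simp only [valAt, List.filter_append, List.map_append, List.foldl_append]
  by_cases h : r = pq.1
  · simp [h, List.filter]
  · have : (pq.1 == r) = false := by simp [Ne.symm h]
    simp [List.filter, this, h]

lemma ofList_append_singleton (l : List String) (p : String) :
    PySem.Set.ofList (l ++ [p]) = PySem.Set.add (PySem.Set.ofList l) p := by
  simp [PySem.Set.ofList, List.foldl_append]

lemma table_spec (pairs : List (String × Int)) :
    (pairs.foldl stepA PySem.Dict.empty).items = tableOf pairs := by
  induction pairs using List.reverseRecOn with
  | nil => rfl
  | append_singleton ps pq ih =>
    rw [List.foldl_append, List.foldl_cons, List.foldl_nil]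
    have hd : ps.foldl stepA PySem.Dict.empty = PySem.Dict.mk (tableOf ps) := by
      cases hD : ps.foldl stepA PySem.Dict.empty with
      | mk its => simpa [hD] using ih
    rw [hd]
    obtain ⟨p, q⟩ := pq
    simp only [stepA, PySem.Dict.insert, getD_table, contains_table]
    have hmapfst : (ps ++ [(p, q)]).map Prod.fst = ps.map Prod.fst ++ [p] := by simp
    by_cases hmem : p ∈ ps.map Prod.fst
    · have hset : PySem.Set.ofList ((ps ++ [(p, q)]).map Prod.fst)
          = PySem.Set.ofList (ps.map Prod.fst) := by
        rw [hmapfst, ofList_append_singleton]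
        simp [PySem.Set.add, PySem.Set.contains, PySem.Set.mem_ofList, hmem]
      simp only [hmem, decide_true, if_true, tableOf, hset, List.map_map]
      apply List.map_congr_left
      intro r _
      by_cases hr : r = p
      · simp [hr, valAt_append_singleton]
      · simp [hr, valAt_append_singleton]
    · have hset : PySem.Set.ofList ((ps ++ [(p, q)]).map Prod.fst)
          = PySem.Set.ofList (ps.map Prod.fst) ++ [p] := by
        rw [hmapfst, ofList_append_singleton]
        simp [PySem.Set.add, PySem.Set.contains, PySem.Set.mem_ofList, hmem]
      have hcond : decide (p ∈ ps.map Prod.fst) = false := by simp [hmem]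
      have hgoal : tableOf (ps ++ [(p, q)])
          = tableOf ps ++ [(p, max (valAt ps p) q)] := by
        rw [tableOf, hset, List.map_append, List.map_singleton]
        refine congrArg₂ (· ++ ·) ?_ ?_
        · apply List.map_congr_left
          intro r hrmem
          have hr : r ≠ p := by
            intro h
            exact hmem (by simpa [h] using (PySem.Set.mem_ofList _ _).1 hrmem)
          simp [valAt_append_singleton, hr]
        · simp [valAt_append_singleton]
      rw [hcond]
      simp only [Bool.false_eq_true, if_false]
      exact hgoal.symm

lemma foldA_eq_filterMap (ds : List String) (d : PySem.Dict String Int) :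
    (ds.foldl (fun d s =>
      match parseEntry s with
      | none => d
      | some pq => d.insert pq.1 (max (d.getD pq.1 0) pq.2)) d)
    = (ds.filterMap parseEntry).foldl stepA d := by
  induction ds generalizing d with
  | nil => rfl
  | cons s t ih =>
    rw [List.foldl_cons, List.filterMap_cons]
    cases h : parseEntry s <;> simp [ih, stepA]

-- ===== VERDICT (by name: the statement is the Claim_ definition above) =====
theorem build_display_counters_py_spec : Claim_equal_build_display_counters_py := by
  intro ds _
  unfold Spec_build_display_counters_py build_display_counters_py build_display_counters_py_alt
  rw [foldA_eq_filterMap ds PySem.Dict.empty, table_spec]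
  simp [tableOf, valAt, PySem.List.dedup]
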